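-- pv_equiv track=rewrite | github.com/Oumayma-O/chem-tutor-backend | app/utils/markdown_sanitizer.py | _consume_latex_run
-- ===== SOURCE A (Python) =====
-- def _skip_balanced_braces(s: str, i: int) -> int:
--     if i >= len(s) or s[i] != "{":
--         return i
--     depth = 0
--     k = i
--     while k < len(s):
--         if s[k] == "{":
--             depth += 1
--         elif s[k] == "}":
--             depth -= 1
--             if depth == 0:
--                 return k + 1
--         k += 1
--     return len(s)
--
-- def _skip_optional_square_brackets(s: str, i: int) -> int:
--     if i >= len(s) or s[i] != "[":
--         return i
--     depth = 1
--     k = i + 1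
--     while k < len(s) and depth > 0:
--         if s[k] == "[":
--             depth += 1
--         elif s[k] == "]":
--             depth -= 1
--         k += 1
--     return k
--
-- def _consume_one_latex_atom(s: str, i: int) -> int:
--     if i >= len(s):
--         return i
--     if s[i] in "^_":
--         k = i + 1
--         if k < len(s) and s[k] == "{":
--             return _skip_balanced_braces(s, k)
--         if k < len(s):
--             return k + 1
--         return i + 1
--     if s[i] != "\\":
--         return i
--     j = i + 1
--     if j >= len(s):
--         return i
--     if s[j].isalpha():
--         while j < len(s) and s[j].isalpha():
--             j += 1
--     else:
--         j += 1
--     k = j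
--     if k < len(s) and s[k] == "*":
--         k += 1
--     while k < len(s) and s[k] == "[":
--         k = _skip_optional_square_brackets(s, k)
--     while k < len(s) and s[k] == "{":
--         k = _skip_balanced_braces(s, k)
--     return k
--
-- def _consume_latex_run(s: str, start: int) -> int:
--     i = start
--     while i < len(s):
--         nxt = _consume_one_latex_atom(s, i)
--         if nxt == i:
--             break
--         i = nxt
--     return i
-- ===== SOURCE B (Python) =====
-- def _consume_latex_run(s: str, start: int) -> int:
--     # Recursive-descent matcher: balanced {...} / [...] groups are skipped by a
--     # recursive `group` (recursion on nesting) instead of depth counters, and a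
--     # single dispatch loop replaces A's per-atom helpers and progress check.
--     n = len(s)
--
--     def group(i: int, op: str, cl: str) -> int:
--         # s[i] == op; return the index just past the matching cl, or n if unbalanced
--         j = i + 1
--         while j < n:
--             c = s[j]
--             if c == cl:
--                 return j + 1
--             j = group(j, op, cl) if c == op else j + 1
--         return n
--
--     i = start
--     while i < n:
--         c = s[i]
--         if c == "^" or c == "_":
--             if i + 1 < n and s[i + 1] == "{":
--                 i = group(i + 1, "{", "}")
--             else:
--                 i = min(i + 2, n)
--         elif c == "\\" and i + 1 < n:
--             j = i + 1
--             while j < n and s[j].isalpha():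
--                 j += 1
--             if j == i + 1:
--                 j += 1
--             if j < n and s[j] == "*":
--                 j += 1
--             while j < n and s[j] == "[":
--                 j = group(j, "[", "]")
--             while j < n and s[j] == "{":
--                 j = group(j, "{", "}")
--             i = j
--         else:
--             break
--     return i
-- ===== Notes on version B (the rewrite author's own statement) =====
-- stated objective: alternative
-- what changed: Balanced {...} and [...] groups are skipped by a recursive-descent matcher (recursion on nesting, no depth variable) instead of A's iterative depth-counter skip helpers, and a single dispatch loop with guaranteed progress replaces A's per-atom helper plus nxt==i progress check.
import Mathlib
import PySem

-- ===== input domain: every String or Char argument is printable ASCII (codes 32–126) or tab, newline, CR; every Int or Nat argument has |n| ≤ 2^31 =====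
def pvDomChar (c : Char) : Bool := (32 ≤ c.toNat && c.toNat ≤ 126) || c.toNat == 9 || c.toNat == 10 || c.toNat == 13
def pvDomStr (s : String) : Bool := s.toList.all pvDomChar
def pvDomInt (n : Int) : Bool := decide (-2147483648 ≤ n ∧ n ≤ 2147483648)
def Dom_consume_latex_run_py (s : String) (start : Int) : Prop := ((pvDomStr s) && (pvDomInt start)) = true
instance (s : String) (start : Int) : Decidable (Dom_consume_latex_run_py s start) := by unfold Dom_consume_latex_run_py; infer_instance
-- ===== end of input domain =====

-- B replaces A's iterative depth-counter group skippers by a recursive-descent matcher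
-- (recursion on nesting) and a single dispatch loop; same cost, no speed claim.

-- ===== PORT A =====
-- the while-loop of _skip_balanced_braces (falls through to len(s) when fuel runs out, like the loop exit)
def aBraceLoop (cs : List Char) (n : Int) : Nat → Int → Int → Int
  | 0, _, _ => n
  | f+1, k, depth =>
    if k < n then
      let c := PySem.List.pyGetD cs k ' '
      if c = '{' then aBraceLoop cs n f (k+1) (depth+1)
      else if c = '}' then
        if depth - 1 = 0 then k + 1 else aBraceLoop cs n f (k+1) (depth-1)
      else aBraceLoop cs n f (k+1) depth
    else n

def aSkipBraces (cs : List Char) (n : Int) (F : Nat) (i : Int) : Int :=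
  if n ≤ i ∨ ¬ (PySem.List.pyGetD cs i ' ' = '{') then i else aBraceLoop cs n F i 0

-- the while-loop of _skip_optional_square_brackets
def aBrkLoop (cs : List Char) (n : Int) : Nat → Int → Int → Int
  | 0, k, _ => k
  | f+1, k, depth =>
    if k < n ∧ 0 < depth then
      let c := PySem.List.pyGetD cs k ' '
      aBrkLoop cs n f (k+1) (if c = '[' then depth+1 else if c = ']' then depth-1 else depth)
    else k

def aSkipBrackets (cs : List Char) (n : Int) (F : Nat) (i : Int) : Int :=
  if n ≤ i ∨ ¬ (PySem.List.pyGetD cs i ' ' = '[') then i else aBrkLoop cs n F (i+1) 1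

-- the alpha-name while-loop in _consume_one_latex_atom
def aAlphaLoop (cs : List Char) (n : Int) : Nat → Int → Int
  | 0, j => j
  | f+1, j =>
    if j < n ∧ PySem.Chars.isalpha (PySem.List.pyGetD cs j ' ') then aAlphaLoop cs n f (j+1) else j

-- "while k < len(s) and s[k] == '[': k = _skip_optional_square_brackets(s, k)"
def aBrkGroups (cs : List Char) (n : Int) (F : Nat) : Nat → Int → Int
  | 0, k => k
  | f+1, k =>
    if k < n ∧ PySem.List.pyGetD cs k ' ' = '[' then aBrkGroups cs n F f (aSkipBrackets cs n F k) else k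

-- "while k < len(s) and s[k] == '{': k = _skip_balanced_braces(s, k)"
def aBrcGroups (cs : List Char) (n : Int) (F : Nat) : Nat → Int → Int
  | 0, k => k
  | f+1, k =>
    if k < n ∧ PySem.List.pyGetD cs k ' ' = '{' then aBrcGroups cs n F f (aSkipBraces cs n F k) else k

def aAtom (cs : List Char) (n : Int) (F : Nat) (i : Int) : Int :=
  if n ≤ i then i
  else
    let c := PySem.List.pyGetD cs i ' '
    if c = '^' ∨ c = '_' then
      (if i+1 < n ∧ PySem.List.pyGetD cs (i+1) ' ' = '{' then aSkipBraces cs n F (i+1)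
       else if i+1 < n then i+2 else i+1)
    else if ¬ (c = '\\') then i
    else if n ≤ i+1 then i
    else
      let j := if PySem.Chars.isalpha (PySem.List.pyGetD cs (i+1) ' ') then aAlphaLoop cs n F (i+1) else i+2
      let k := if j < n ∧ PySem.List.pyGetD cs j ' ' = '*' then j+1 else j
      aBrcGroups cs n F F (aBrkGroups cs n F F k)

def aRun (cs : List Char) (n : Int) (F : Nat) : Nat → Int → Int
  | 0, i => i
  | f+1, i =>
    if i < n then
      let nxt := aAtom cs n F i
      if nxt = i then i else aRun cs n F f nxt
    else i

def consume_latex_run_py (s : String) (start : Int) : Int :=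
  let cs := s.toList
  let n : Int := cs.length
  let F : Nat := cs.length + start.natAbs + 2   -- fuel: each loop advances its index by ≥ 1 below n
  aRun cs n F F start

-- ===== PORT B =====
-- B's recursive-descent group matcher: `group(i, op, cl)` scans from i+1, returning j+1 at the
-- matching close and recursing on a nested opener; this is the body of that scan (group i = scan (i+1)).
def bScanB (cs : List Char) (n : Int) (op cl : Char) : Nat → Int → Int
  | 0, _ => n
  | f+1, j =>
    if j < n then
      let c := PySem.List.pyGetD cs j ' '
      if c = cl then j + 1
      else bScanB cs n op cl f (if c = op then bScanB cs n op cl f (j+1) else j+1)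
    else n

-- B's "while j < n and s[j] == op: j = group(j, op, cl)"
def bGroupsB (cs : List Char) (n : Int) (op cl : Char) (F : Nat) : Nat → Int → Int
  | 0, j => j
  | f+1, j =>
    if j < n ∧ PySem.List.pyGetD cs j ' ' = op then
      bGroupsB cs n op cl F f (bScanB cs n op cl F (j+1))
    else j

def bAlphaB (cs : List Char) (n : Int) : Nat → Int → Int
  | 0, j => j
  | f+1, j =>
    if j < n ∧ PySem.Chars.isalpha (PySem.List.pyGetD cs j ' ') then bAlphaB cs n f (j+1) else j

-- B's single dispatch loop
def bRunB (cs : List Char) (n : Int) (F : Nat) : Nat → Int → Int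
  | 0, i => i
  | f+1, i =>
    if i < n then
      let c := PySem.List.pyGetD cs i ' '
      if c = '^' ∨ c = '_' then
        bRunB cs n F f
          (if i+1 < n ∧ PySem.List.pyGetD cs (i+1) ' ' = '{' then bScanB cs n '{' '}' F (i+2)
           else min (i+2) n)
      else if c = '\\' ∧ i+1 < n then
        let j0 := bAlphaB cs n F (i+1)
        let j1 := if j0 = i+1 then j0+1 else j0
        let j2 := if j1 < n ∧ PySem.List.pyGetD cs j1 ' ' = '*' then j1+1 else j1
        bRunB cs n F f (bGroupsB cs n '{' '}' F F (bGroupsB cs n '[' ']' F F j2))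
      else i
    else i

def consume_latex_run_py_alt (s : String) (start : Int) : Int :=
  let cs := s.toList
  let n : Int := cs.length
  let F : Nat := cs.length + start.natAbs + 2
  bRunB cs n F F start

-- ===== PRECONDITION & SPEC =====
-- Pre_ excludes exactly start < -len(s), where Python's s[start] raises IndexError in both programs.
def Pre_consume_latex_run_py (s : String) (start : Int) : Prop := -(s.toList.length : Int) ≤ start
instance (s : String) (start : Int) : Decidable (Pre_consume_latex_run_py s start) := by unfold Pre_consume_latex_run_py; infer_instance

def pvWitness_consume_latex_run_py : String × Int := ("\\frac{a}{b}^2 x", 0)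

def Spec_consume_latex_run_py (s : String) (start : Int) (out : Int) : Prop := out = consume_latex_run_py_alt s start
instance (s : String) (start : Int) (out : Int) : Decidable (Spec_consume_latex_run_py s start out) := by unfold Spec_consume_latex_run_py; infer_instance

-- ===== CLAIM (what is proved, stated in full; the proofs are below) =====
def Claim_equal_consume_latex_run_py : Prop := ∀ (s : String) (start : Int), Dom_consume_latex_run_py s start → Pre_consume_latex_run_py s start → Spec_consume_latex_run_py s start (consume_latex_run_py s start)

-- ===== LEMMAS AND PROOFS =====

theorem bScanB_n (cs : List Char) (n : Int) (op cl : Char) :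
    ∀ (g : Nat), bScanB cs n op cl g n = n := by
  intro g; cases g <;> simp [bScanB]

-- progress, boundedness and fuel-independence of B's group scan
theorem bScanB_spec (cs : List Char) (n : Int) (op cl : Char) :
    ∀ (g : Nat) (j : Int), j ≤ n → n ≤ j + g →
      (j < bScanB cs n op cl g j ∨ bScanB cs n op cl g j = n) ∧
      bScanB cs n op cl g j ≤ n ∧
      ∀ (g' : Nat), n ≤ j + g' → bScanB cs n op cl g' j = bScanB cs n op cl g j := by
  intro g
  induction g with
  | zero =>
    intro j hjn hfuel
    have hj : j = n := by omega
    refine ⟨Or.inr (by simp [hj, bScanB_n]), by simp [hj, bScanB_n], ?_⟩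
    intro g' _
    simp [hj, bScanB_n]
  | succ g ih =>
    intro j hjn hfuel
    by_cases hj : j < n
    · have hg' : ∀ (g' : Nat), n ≤ j + g' → ∃ g'', g' = g'' + 1 := by
        intro g' h
        cases g' with
        | zero => exfalso; omega
        | succ g'' => exact ⟨g'', rfl⟩
      by_cases hcl : PySem.List.pyGetD cs j ' ' = cl
      · have hstep : ∀ (h : Nat), bScanB cs n op cl (h+1) j = j + 1 := by
          intro h
          simp only [bScanB, if_pos hj]
          rw [if_pos hcl]
        refine ⟨Or.inl (by rw [hstep g]; omega), by rw [hstep g]; omega, ?_⟩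
        intro g' hgf
        obtain ⟨g'', rfl⟩ := hg' g' hgf
        rw [hstep g'', hstep g]
      · by_cases hop : PySem.List.pyGetD cs j ' ' = op
        · have hstep : ∀ (h : Nat), bScanB cs n op cl (h+1) j
              = bScanB cs n op cl h (bScanB cs n op cl h (j+1)) := by
            intro h
            simp only [bScanB, if_pos hj]
            rw [if_neg hcl, if_pos hop]
          obtain ⟨hp1, hp2, hp3⟩ := ih (j+1) (by omega) (by omega)
          set p := bScanB cs n op cl g (j+1) with hp
          by_cases hpn : p = n
          · have hres : bScanB cs n op cl (g+1) j = n := by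
              rw [hstep g, ← hp, hpn, bScanB_n]
            refine ⟨Or.inr hres, le_of_eq hres, ?_⟩
            intro g' hgf
            obtain ⟨g'', rfl⟩ := hg' g' hgf
            rw [hstep g'', hres, hp3 g'' (by omega), hpn, bScanB_n]
          · have hpgt : j + 1 < p := by
              rcases hp1 with h | h
              · exact h
              · exact absurd h hpn
            obtain ⟨hq1, hq2, hq3⟩ := ih p (by omega) (by omega)
            set q := bScanB cs n op cl g p with hq
            have hres : bScanB cs n op cl (g+1) j = q := by rw [hstep g, ← hp, ← hq]
            refine ⟨?_, by rw [hres]; exact hq2, ?_⟩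
            · rw [hres]
              rcases hq1 with h | h
              · exact Or.inl (by omega)
              · exact Or.inr h
            · intro g' hgf
              obtain ⟨g'', rfl⟩ := hg' g' hgf
              rw [hstep g'', hres, hp3 g'' (by omega), hq3 g'' (by omega)]
        · have hstep : ∀ (h : Nat), bScanB cs n op cl (h+1) j = bScanB cs n op cl h (j+1) := by
            intro h
            simp only [bScanB, if_pos hj]
            rw [if_neg hcl, if_neg hop]
          obtain ⟨hp1, hp2, hp3⟩ := ih (j+1) (by omega) (by omega)
          refine ⟨?_, by rw [hstep g]; exact hp2, ?_⟩
          · rw [hstep g]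
            rcases hp1 with h | h
            · exact Or.inl (by omega)
            · exact Or.inr h
          · intro g' hgf
            obtain ⟨g'', rfl⟩ := hg' g' hgf
            rw [hstep g'', hstep g, hp3 g'' (by omega)]
    · have hj' : j = n := by omega
      refine ⟨Or.inr (by simp [hj', bScanB_n]), by simp [hj', bScanB_n], ?_⟩
      intro g' _
      simp [hj', bScanB_n]

theorem bScanB_indep (cs : List Char) (n : Int) (op cl : Char) (g g' : Nat) (j : Int)
    (hjn : j ≤ n) (hg : n ≤ j + g) (hg' : n ≤ j + g') :
    bScanB cs n op cl g' j = bScanB cs n op cl g j :=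
  (bScanB_spec cs n op cl g j hjn hg).2.2 g' hg'

theorem bScanB_lt (cs : List Char) (n : Int) (op cl : Char) (g : Nat) (j : Int)
    (hjn : j ≤ n) (hg : n ≤ j + g) :
    j < bScanB cs n op cl g j ∨ bScanB cs n op cl g j = n :=
  (bScanB_spec cs n op cl g j hjn hg).1

theorem bScanB_le (cs : List Char) (n : Int) (op cl : Char) (g : Nat) (j : Int)
    (hjn : j ≤ n) (hg : n ≤ j + g) :
    bScanB cs n op cl g j ≤ n :=
  (bScanB_spec cs n op cl g j hjn hg).2.1

theorem bScanB_step_cl (cs : List Char) (n : Int) (op cl : Char) (F : Nat) (k : Int)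
    (hk : k < n) (hF : n ≤ k + F) (hc : PySem.List.pyGetD cs k ' ' = cl) :
    bScanB cs n op cl F k = k + 1 := by
  obtain ⟨F', rfl⟩ : ∃ F', F = F' + 1 := by
    cases F with
    | zero => exfalso; omega
    | succ F' => exact ⟨F', rfl⟩
  simp only [bScanB, if_pos hk]
  rw [if_pos hc]

theorem bScanB_step_other (cs : List Char) (n : Int) (op cl : Char) (F : Nat) (k : Int)
    (hk : k < n) (hF : n ≤ k + F)
    (hcl : ¬ PySem.List.pyGetD cs k ' ' = cl) (hop : ¬ PySem.List.pyGetD cs k ' ' = op) :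
    bScanB cs n op cl F k = bScanB cs n op cl F (k+1) := by
  obtain ⟨F', rfl⟩ : ∃ F', F = F' + 1 := by
    cases F with
    | zero => exfalso; omega
    | succ F' => exact ⟨F', rfl⟩
  have h1 : bScanB cs n op cl (F'+1) k
      = bScanB cs n op cl F' (k+1) := by
    simp only [bScanB, if_pos hk]
    rw [if_neg hcl, if_neg hop]
  rw [h1]
  exact bScanB_indep cs n op cl (F'+1) F' (k+1) (by omega) (by push_cast; omega) (by omega)

theorem bScanB_step_op (cs : List Char) (n : Int) (op cl : Char) (F : Nat) (k : Int)
    (hk : k < n) (hF : n ≤ k + F)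
    (hcl : ¬ PySem.List.pyGetD cs k ' ' = cl) (hop : PySem.List.pyGetD cs k ' ' = op) :
    bScanB cs n op cl F k = bScanB cs n op cl F (bScanB cs n op cl F (k+1)) := by
  obtain ⟨F', rfl⟩ : ∃ F', F = F' + 1 := by
    cases F with
    | zero => exfalso; omega
    | succ F' => exact ⟨F', rfl⟩
  have h1 : bScanB cs n op cl F' (k+1) = bScanB cs n op cl (F'+1) (k+1) :=
    bScanB_indep cs n op cl (F'+1) F' (k+1) (by omega) (by push_cast; omega) (by omega)
  have hstep : bScanB cs n op cl (F'+1) k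
      = bScanB cs n op cl F' (bScanB cs n op cl F' (k+1)) := by
    simp only [bScanB, if_pos hk]
    rw [if_neg hcl, if_pos hop]
  rw [hstep, h1]
  set p := bScanB cs n op cl (F'+1) (k+1) with hp
  have hple : p ≤ n := bScanB_le cs n op cl (F'+1) (k+1) (by omega) (by push_cast; omega)
  have hd : k + 1 < p ∨ p = n :=
    bScanB_lt cs n op cl (F'+1) (k+1) (by omega) (by push_cast; omega)
  exact bScanB_indep cs n op cl (F'+1) F' p hple
    (by push_cast; omega) (by rcases hd with h | h <;> omega)

def chainS (cs : List Char) (n : Int) (op cl : Char) (F : Nat) : Nat → Int → Int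
  | 0, k => k
  | d+1, k => chainS cs n op cl F d (bScanB cs n op cl F k)

theorem chainS_n (cs : List Char) (n : Int) (op cl : Char) (F : Nat) :
    ∀ (d : Nat), chainS cs n op cl F d n = n := by
  intro d
  induction d with
  | zero => rfl
  | succ d ih => simp [chainS, bScanB_n, ih]

-- A's depth-d brace scan is d chained recursive-descent scans
theorem brace_chain (cs : List Char) (n : Int) (F : Nat) :
    ∀ (f : Nat) (k d : Int), 1 ≤ d → k ≤ n → n ≤ k + f → n ≤ k + F →
      aBraceLoop cs n f k d = chainS cs n '{' '}' F d.toNat k := by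
  intro f
  induction f with
  | zero =>
    intro k d hd hkn hf hF
    have hk : k = n := by omega
    simp [aBraceLoop, hk, chainS_n]
  | succ f ih =>
    intro k d hd hkn hf hF
    by_cases hk : k < n
    · obtain ⟨m, hm⟩ : ∃ m, d.toNat = m + 1 := ⟨d.toNat - 1, by omega⟩
      by_cases hop : PySem.List.pyGetD cs k ' ' = '{'
      · have hL : aBraceLoop cs n (f+1) k d = aBraceLoop cs n f (k+1) (d+1) := by
          simp only [aBraceLoop, if_pos hk]
          rw [if_pos hop]
        rw [hL, ih (k+1) (d+1) (by omega) (by omega) (by push_cast at hf ⊢; omega) (by omega)]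
        have h1 : (d+1).toNat = m + 2 := by omega
        rw [h1, hm]
        have hb : bScanB cs n '{' '}' F k
            = bScanB cs n '{' '}' F (bScanB cs n '{' '}' F (k+1)) :=
          bScanB_step_op cs n '{' '}' F k hk hF (by simp [hop]) hop
        calc chainS cs n '{' '}' F (m+2) (k+1)
            = chainS cs n '{' '}' F m (bScanB cs n '{' '}' F (bScanB cs n '{' '}' F (k+1))) := rfl
          _ = chainS cs n '{' '}' F m (bScanB cs n '{' '}' F k) := by rw [← hb]
          _ = chainS cs n '{' '}' F (m+1) k := rfl
      · by_cases hcl : PySem.List.pyGetD cs k ' ' = '}'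
        · have hb : bScanB cs n '{' '}' F k = k + 1 :=
            bScanB_step_cl cs n '{' '}' F k hk hF hcl
          have hL : aBraceLoop cs n (f+1) k d
              = if d - 1 = 0 then k + 1 else aBraceLoop cs n f (k+1) (d-1) := by
            simp only [aBraceLoop, if_pos hk]
            rw [if_neg hop, if_pos hcl]
          rw [hL]
          by_cases hd1 : d - 1 = 0
          · rw [if_pos hd1]
            have : d.toNat = 1 := by omega
            rw [this]
            show k + 1 = bScanB cs n '{' '}' F k
            rw [hb]
          · rw [if_neg hd1, ih (k+1) (d-1) (by omega) (by omega) (by push_cast at hf ⊢; omega) (by omega)]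
            have h1 : (d-1).toNat = m := by omega
            rw [h1, hm]
            show chainS cs n '{' '}' F m (k+1) = chainS cs n '{' '}' F m (bScanB cs n '{' '}' F k)
            rw [hb]
        · have hL : aBraceLoop cs n (f+1) k d = aBraceLoop cs n f (k+1) d := by
            simp only [aBraceLoop, if_pos hk]
            rw [if_neg hop, if_neg hcl]
          rw [hL, ih (k+1) d (by omega) (by omega) (by push_cast at hf ⊢; omega) (by omega), hm]
          have hb : bScanB cs n '{' '}' F k = bScanB cs n '{' '}' F (k+1) :=
            bScanB_step_other cs n '{' '}' F k hk hF hcl hop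
          show chainS cs n '{' '}' F m (bScanB cs n '{' '}' F (k+1))
              = chainS cs n '{' '}' F m (bScanB cs n '{' '}' F k)
          rw [hb]
    · have hkn' : k = n := by omega
      simp [aBraceLoop, hkn', chainS_n]

theorem aBrkLoop_zero (cs : List Char) (n : Int) :
    ∀ (f : Nat) (k : Int), aBrkLoop cs n f k 0 = k := by
  intro f k; cases f <;> simp [aBrkLoop]

theorem bracket_chain (cs : List Char) (n : Int) (F : Nat) :
    ∀ (f : Nat) (k d : Int), 1 ≤ d → k ≤ n → n ≤ k + f → n ≤ k + F →
      aBrkLoop cs n f k d = chainS cs n '[' ']' F d.toNat k := by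
  intro f
  induction f with
  | zero =>
    intro k d hd hkn hf hF
    have hk : k = n := by omega
    simp [aBrkLoop, hk, chainS_n]
  | succ f ih =>
    intro k d hd hkn hf hF
    by_cases hk : k < n
    · obtain ⟨m, hm⟩ : ∃ m, d.toNat = m + 1 := ⟨d.toNat - 1, by omega⟩
      have hcond : k < n ∧ 0 < d := ⟨hk, by omega⟩
      by_cases hop : PySem.List.pyGetD cs k ' ' = '['
      · have hL : aBrkLoop cs n (f+1) k d = aBrkLoop cs n f (k+1) (d+1) := by
          simp only [aBrkLoop, if_pos hcond]
          rw [if_pos hop]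
        rw [hL, ih (k+1) (d+1) (by omega) (by omega) (by push_cast at hf ⊢; omega) (by omega)]
        have h1 : (d+1).toNat = m + 2 := by omega
        rw [h1, hm]
        have hb : bScanB cs n '[' ']' F k
            = bScanB cs n '[' ']' F (bScanB cs n '[' ']' F (k+1)) :=
          bScanB_step_op cs n '[' ']' F k hk hF (by simp [hop]) hop
        calc chainS cs n '[' ']' F (m+2) (k+1)
            = chainS cs n '[' ']' F m (bScanB cs n '[' ']' F (bScanB cs n '[' ']' F (k+1))) := rfl
          _ = chainS cs n '[' ']' F m (bScanB cs n '[' ']' F k) := by rw [← hb]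
          _ = chainS cs n '[' ']' F (m+1) k := rfl
      · by_cases hcl : PySem.List.pyGetD cs k ' ' = ']'
        · have hb : bScanB cs n '[' ']' F k = k + 1 :=
            bScanB_step_cl cs n '[' ']' F k hk hF hcl
          have hL : aBrkLoop cs n (f+1) k d = aBrkLoop cs n f (k+1) (d-1) := by
            simp only [aBrkLoop, if_pos hcond]
            rw [if_neg hop, if_pos hcl]
          rw [hL]
          by_cases hd1 : d = 1
          · rw [hd1]
            have h0 : (1:Int) - 1 = 0 := by norm_num
            rw [h0, aBrkLoop_zero]
            show k + 1 = bScanB cs n '[' ']' F k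
            rw [hb]
          · rw [ih (k+1) (d-1) (by omega) (by omega) (by push_cast at hf ⊢; omega) (by omega)]
            have h1 : (d-1).toNat = m := by omega
            rw [h1, hm]
            show chainS cs n '[' ']' F m (k+1) = chainS cs n '[' ']' F m (bScanB cs n '[' ']' F k)
            rw [hb]
        · have hL : aBrkLoop cs n (f+1) k d = aBrkLoop cs n f (k+1) d := by
            simp only [aBrkLoop, if_pos hcond]
            rw [if_neg hop, if_neg hcl]
          rw [hL, ih (k+1) d (by omega) (by omega) (by push_cast at hf ⊢; omega) (by omega), hm]
          have hb : bScanB cs n '[' ']' F k = bScanB cs n '[' ']' F (k+1) :=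
            bScanB_step_other cs n '[' ']' F k hk hF hcl hop
          show chainS cs n '[' ']' F m (bScanB cs n '[' ']' F (k+1))
              = chainS cs n '[' ']' F m (bScanB cs n '[' ']' F k)
          rw [hb]
    · have hkn' : k = n := by omega
      simp [aBrkLoop, hkn', chainS_n]

theorem skipBraces_eq (cs : List Char) (n : Int) (Fa F : Nat) (i : Int)
    (hi : i < n) (hc : PySem.List.pyGetD cs i ' ' = '{')
    (hFa : n ≤ i + Fa) (hF : n ≤ i + F) :
    aSkipBraces cs n Fa i = bScanB cs n '{' '}' F (i+1) := by
  unfold aSkipBraces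
  rw [if_neg (by push Not; exact ⟨by omega, by simp [hc]⟩)]
  obtain ⟨Fa', rfl⟩ : ∃ x, Fa = x + 1 := by
    cases Fa with
    | zero => exfalso; omega
    | succ x => exact ⟨x, rfl⟩
  have h1 : aBraceLoop cs n (Fa'+1) i 0 = aBraceLoop cs n Fa' (i+1) (0+1) := by
    simp only [aBraceLoop, if_pos hi]
    rw [if_pos hc]
  rw [h1, brace_chain cs n F Fa' (i+1) (0+1) (by omega) (by omega)
    (by push_cast at hFa ⊢; omega) (by omega)]
  rfl

theorem skipBrackets_eq (cs : List Char) (n : Int) (Fa F : Nat) (i : Int)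
    (hi : i < n) (hc : PySem.List.pyGetD cs i ' ' = '[')
    (hFa : n ≤ i + Fa) (hF : n ≤ i + F) :
    aSkipBrackets cs n Fa i = bScanB cs n '[' ']' F (i+1) := by
  unfold aSkipBrackets
  rw [if_neg (by push Not; exact ⟨by omega, by simp [hc]⟩)]
  rw [bracket_chain cs n F Fa (i+1) 1 (by omega) (by omega)
    (by omega) (by omega)]
  rfl

theorem bGroupsB_ge (cs : List Char) (n : Int) (op cl : Char) (F : Nat) :
    ∀ (f : Nat) (j : Int), j ≤ n → n ≤ j + F → j ≤ bGroupsB cs n op cl F f j := by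
  intro f
  induction f with
  | zero => intro j _ _; simp [bGroupsB]
  | succ f ih =>
    intro j hjn hF
    simp only [bGroupsB]
    split
    · rename_i h
      have hv : j + 1 ≤ bScanB cs n op cl F (j+1) := by
        rcases bScanB_lt cs n op cl F (j+1) (by omega) (by omega) with hh | hh <;> omega
      have hvle : bScanB cs n op cl F (j+1) ≤ n :=
        bScanB_le cs n op cl F (j+1) (by omega) (by omega)
      exact le_trans (by omega) (ih _ hvle (by omega))
    · exact le_refl j

theorem brkGroups_eq (cs : List Char) (n : Int) (Fa Fb : Nat) :
    ∀ (f g : Nat) (k : Int), k ≤ n → n ≤ k + f → n ≤ k + g → n ≤ k + Fa → n ≤ k + Fb →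
      aBrkGroups cs n Fa f k = bGroupsB cs n '[' ']' Fb g k := by
  intro f
  induction f with
  | zero =>
    intro g k hkn hf hg hFa hFb
    have hk : ¬ (k < n) := by omega
    have hno : ¬ (k < n ∧ PySem.List.pyGetD cs k ' ' = '[') := by tauto
    cases g <;> simp [aBrkGroups, bGroupsB, hno]
  | succ f ih =>
    intro g k hkn hf hg hFa hFb
    by_cases h : k < n ∧ PySem.List.pyGetD cs k ' ' = '['
    · obtain ⟨g', rfl⟩ : ∃ g', g = g' + 1 := by
        cases g with
        | zero => exfalso; omega
        | succ g' => exact ⟨g', rfl⟩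
      simp only [aBrkGroups, bGroupsB, if_pos h]
      rw [skipBrackets_eq cs n Fa Fb k h.1 h.2 hFa hFb]
      have hv : k + 1 ≤ bScanB cs n '[' ']' Fb (k+1) := by
        rcases bScanB_lt cs n '[' ']' Fb (k+1) (by omega) (by omega) with hh | hh <;> omega
      have hvle : bScanB cs n '[' ']' Fb (k+1) ≤ n :=
        bScanB_le cs n '[' ']' Fb (k+1) (by omega) (by omega)
      exact ih g' _ hvle (by push_cast at hf ⊢; omega) (by push_cast at hg ⊢; omega)
        (by omega) (by omega)
    · cases g <;> simp [aBrkGroups, bGroupsB, h]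

theorem brcGroups_eq (cs : List Char) (n : Int) (Fa Fb : Nat) :
    ∀ (f g : Nat) (k : Int), k ≤ n → n ≤ k + f → n ≤ k + g → n ≤ k + Fa → n ≤ k + Fb →
      aBrcGroups cs n Fa f k = bGroupsB cs n '{' '}' Fb g k := by
  intro f
  induction f with
  | zero =>
    intro g k hkn hf hg hFa hFb
    have hk : ¬ (k < n) := by omega
    have hno : ¬ (k < n ∧ PySem.List.pyGetD cs k ' ' = '{') := by tauto
    cases g <;> simp [aBrcGroups, bGroupsB, hno]
  | succ f ih =>
    intro g k hkn hf hg hFa hFb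
    by_cases h : k < n ∧ PySem.List.pyGetD cs k ' ' = '{'
    · obtain ⟨g', rfl⟩ : ∃ g', g = g' + 1 := by
        cases g with
        | zero => exfalso; omega
        | succ g' => exact ⟨g', rfl⟩
      simp only [aBrcGroups, bGroupsB, if_pos h]
      rw [skipBraces_eq cs n Fa Fb k h.1 h.2 hFa hFb]
      have hv : k + 1 ≤ bScanB cs n '{' '}' Fb (k+1) := by
        rcases bScanB_lt cs n '{' '}' Fb (k+1) (by omega) (by omega) with hh | hh <;> omega
      have hvle : bScanB cs n '{' '}' Fb (k+1) ≤ n :=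
        bScanB_le cs n '{' '}' Fb (k+1) (by omega) (by omega)
      exact ih g' _ hvle (by push_cast at hf ⊢; omega) (by push_cast at hg ⊢; omega)
        (by omega) (by omega)
    · cases g <;> simp [aBrcGroups, bGroupsB, h]

theorem bAlphaB_ge (cs : List Char) (n : Int) :
    ∀ (f : Nat) (j : Int), j ≤ bAlphaB cs n f j := by
  intro f
  induction f with
  | zero => intro j; simp [bAlphaB]
  | succ f ih =>
    intro j
    simp only [bAlphaB]
    split
    · exact le_trans (by omega) (ih (j+1))
    · exact le_refl j

theorem alphaLoop_eq (cs : List Char) (n : Int) :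
    ∀ (f g : Nat) (j : Int), n ≤ j + f → n ≤ j + g →
      aAlphaLoop cs n f j = bAlphaB cs n g j := by
  intro f
  induction f with
  | zero =>
    intro g j hf hg
    have hj : ¬ (j < n) := by omega
    cases g <;> simp [aAlphaLoop, bAlphaB, hj]
  | succ f ih =>
    intro g j hf hg
    by_cases h : j < n ∧ PySem.Chars.isalpha (PySem.List.pyGetD cs j ' ')
    · obtain ⟨g', rfl⟩ : ∃ g', g = g' + 1 := by
        cases g with
        | zero => exfalso; omega
        | succ g' => exact ⟨g', rfl⟩
      simp only [aAlphaLoop, bAlphaB, if_pos h]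
      exact ih g' (j+1) (by omega) (by omega)
    · cases g <;> simp [aAlphaLoop, bAlphaB, h]

theorem bAlphaB_le (cs : List Char) (n : Int) :
    ∀ (f : Nat) (j : Int), j ≤ n → bAlphaB cs n f j ≤ n := by
  intro f
  induction f with
  | zero => intro j h; simpa [bAlphaB] using h
  | succ f ih =>
    intro j h
    simp only [bAlphaB]
    split
    · rename_i hc; exact ih (j+1) (by omega)
    · exact h

theorem bGroupsB_le (cs : List Char) (n : Int) (op cl : Char) (F : Nat) :
    ∀ (f : Nat) (j : Int), j ≤ n → n ≤ j + F → bGroupsB cs n op cl F f j ≤ n := by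
  intro f
  induction f with
  | zero => intro j h _; simpa [bGroupsB] using h
  | succ f ih =>
    intro j hjn hF
    simp only [bGroupsB]
    split
    · rename_i h
      have hvle : bScanB cs n op cl F (j+1) ≤ n :=
        bScanB_le cs n op cl F (j+1) (by omega) (by omega)
      have hv : j + 1 ≤ bScanB cs n op cl F (j+1) := by
        rcases bScanB_lt cs n op cl F (j+1) (by omega) (by omega) with hh | hh <;> omega
      exact ih _ hvle (by omega)
    · exact hjn

theorem aRun_stop (cs : List Char) (n : Int) (F f : Nat) (i : Int) (h : ¬ i < n) :
    aRun cs n F f i = i := by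
  cases f <;> simp [aRun, h]

theorem bRunB_stop (cs : List Char) (n : Int) (F g : Nat) (i : Int) (h : ¬ i < n) :
    bRunB cs n F g i = i := by
  cases g <;> simp [bRunB, h]

theorem run_eq (cs : List Char) (n : Int) (Fa Fb : Nat) :
    ∀ (f g : Nat) (i : Int), i ≤ n → n ≤ i + f → n ≤ i + g → n ≤ i + Fa → n ≤ i + Fb →
      aRun cs n Fa f i = bRunB cs n Fb g i := by
  intro f
  induction f with
  | zero =>
    intro g i hin hf hg hFa hFb
    have hi : ¬ (i < n) := by omega
    cases g <;> simp [aRun, bRunB, hi]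
  | succ f ih =>
    intro g i hin hf hg hFa hFb
    by_cases hi : i < n
    · obtain ⟨g', rfl⟩ : ∃ g', g = g' + 1 := by
        cases g with
        | zero => exfalso; omega
        | succ g' => exact ⟨g', rfl⟩
      simp only [aRun, bRunB, if_pos hi]
      have hatom : aAtom cs n Fa i
          = if n ≤ i then i
            else
              let c := PySem.List.pyGetD cs i ' '
              if c = '^' ∨ c = '_' then
                (if i+1 < n ∧ PySem.List.pyGetD cs (i+1) ' ' = '{' then aSkipBraces cs n Fa (i+1)
                 else if i+1 < n then i+2 else i+1)
              else if ¬ (c = '\\') then i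
              else if n ≤ i+1 then i
              else
                let j := if PySem.Chars.isalpha (PySem.List.pyGetD cs (i+1) ' ') then aAlphaLoop cs n Fa (i+1) else i+2
                let k := if j < n ∧ PySem.List.pyGetD cs j ' ' = '*' then j+1 else j
                aBrcGroups cs n Fa Fa (aBrkGroups cs n Fa Fa k) := rfl
      by_cases h1 : PySem.List.pyGetD cs i ' ' = '^' ∨ PySem.List.pyGetD cs i ' ' = '_'
      · -- superscript/subscript atom
        simp only [hatom, if_neg (by omega : ¬ n ≤ i), if_pos h1]
        by_cases h2 : i+1 < n ∧ PySem.List.pyGetD cs (i+1) ' ' = '{'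
        · rw [if_pos h2, if_pos h2,
            skipBraces_eq cs n Fa Fb (i+1) h2.1 h2.2 (by omega) (by omega)]
          rw [show (i:Int)+1+1 = i+2 from by ring]
          set v := bScanB cs n '{' '}' Fb (i+2) with hv
          have hge : i + 2 ≤ v := by
            rcases bScanB_lt cs n '{' '}' Fb (i+2) (by omega) (by omega) with hh | hh <;> omega
          have hle : v ≤ n := bScanB_le cs n '{' '}' Fb (i+2) (by omega) (by omega)
          rw [if_neg (by omega : ¬ v = i)]
          exact ih g' v hle (by push_cast at hf ⊢; omega) (by push_cast at hg ⊢; omega)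
            (by omega) (by omega)
        · rw [if_neg h2, if_neg h2]
          have hval : (if i+1 < n then i+2 else i+1) = min (i+2) n := by
            rw [min_def]; split_ifs <;> omega
          rw [hval]
          have hge : i + 1 ≤ min (i+2) n := by rw [min_def]; split_ifs <;> omega
          rw [if_neg (by omega : ¬ min (i+2) n = i)]
          exact ih g' _ (by omega) (by push_cast at hf ⊢; omega) (by push_cast at hg ⊢; omega)
            (by omega) (by omega)
      · by_cases h3 : PySem.List.pyGetD cs i ' ' = '\\'
        · -- backslash command atom
          rw [hatom, if_neg (by omega : ¬ n ≤ i)]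
          simp only [h3]
          rw [if_neg (by decide : ¬ ('\\' = '^' ∨ '\\' = '_'))]
          simp only [not_true, if_false]
          by_cases h4 : n ≤ i+1
          · rw [if_pos h4, if_pos rfl]
            rw [if_neg (by decide : ¬ ('\\' = '^' ∨ '\\' = '_')),
                if_neg (by simp only [true_and]; omega : ¬ (True ∧ i + 1 < n))]
          · rw [if_neg h4]
            rw [if_pos (show True ∧ i + 1 < n from ⟨trivial, by omega⟩)]
            -- align the name scan
            have halpha :
                (if PySem.Chars.isalpha (PySem.List.pyGetD cs (i+1) ' ') then aAlphaLoop cs n Fa (i+1) else i+2)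
                = (let j0 := bAlphaB cs n Fb (i+1); if j0 = i+1 then j0+1 else j0) := by
              by_cases ha : PySem.Chars.isalpha (PySem.List.pyGetD cs (i+1) ' ')
              · rw [if_pos ha,
                  alphaLoop_eq cs n Fa Fb (i+1) (by omega) (by omega)]
                have hge : i + 2 ≤ bAlphaB cs n Fb (i+1) := by
                  obtain ⟨F', hF'⟩ : ∃ F', Fb = F' + 1 := by
                    cases Fb with
                    | zero => exfalso; omega
                    | succ F' => exact ⟨F', rfl⟩
                  rw [hF']
                  have hstep : bAlphaB cs n (F'+1) (i+1) = bAlphaB cs n F' (i+1+1) := by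
                    simp only [bAlphaB, if_pos (⟨by omega, ha⟩ : i+1 < n ∧ PySem.Chars.isalpha (PySem.List.pyGetD cs (i+1) ' '))]
                  rw [hstep]
                  have := bAlphaB_ge cs n F' (i+1+1); omega
                show _ = if bAlphaB cs n Fb (i+1) = i+1 then bAlphaB cs n Fb (i+1) + 1 else bAlphaB cs n Fb (i+1)
                rw [if_neg (by omega : ¬ bAlphaB cs n Fb (i+1) = i+1)]
              · rw [if_neg ha]
                have hstop : bAlphaB cs n Fb (i+1) = i+1 := by
                  cases Fb <;> simp [bAlphaB, ha]
                show (i+2 : Int) = if bAlphaB cs n Fb (i+1) = i+1 then bAlphaB cs n Fb (i+1) + 1 else bAlphaB cs n Fb (i+1)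
                rw [if_pos hstop, hstop]
                ring
            set j1 := (let j0 := bAlphaB cs n Fb (i+1); if j0 = i+1 then j0+1 else j0) with hj1
            have hj1ge : i + 2 ≤ j1 := by
              rw [hj1]
              have := bAlphaB_ge cs n Fb (i+1)
              show i + 2 ≤ if bAlphaB cs n Fb (i+1) = i+1 then bAlphaB cs n Fb (i+1) + 1 else bAlphaB cs n Fb (i+1)
              split <;> omega
            have hj1le : j1 ≤ n := by
              rw [hj1]
              have h0 := bAlphaB_le cs n Fb (i+1) (by omega)
              have h0' := bAlphaB_ge cs n Fb (i+1)
              show (if bAlphaB cs n Fb (i+1) = i+1 then bAlphaB cs n Fb (i+1) + 1 else bAlphaB cs n Fb (i+1)) ≤ n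
              split <;> omega
            rw [halpha]
            set j2 := if j1 < n ∧ PySem.List.pyGetD cs j1 ' ' = '*' then j1+1 else j1 with hj2
            have hj2ge : i + 2 ≤ j2 := by rw [hj2]; split <;> omega
            have hj2le : j2 ≤ n := by
              rw [hj2]; split
              · rename_i hh
                have := hh.1
                omega
              · exact hj1le
            rw [brkGroups_eq cs n Fa Fb Fa Fb j2 hj2le (by omega) (by omega)
              (by omega) (by omega)]
            set k1 := bGroupsB cs n '[' ']' Fb Fb j2 with hk1
            have hk1ge : j2 ≤ k1 := bGroupsB_ge cs n '[' ']' Fb Fb j2 hj2le (by omega)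
            have hk1le : k1 ≤ n := bGroupsB_le cs n '[' ']' Fb Fb j2 hj2le (by omega)
            rw [brcGroups_eq cs n Fa Fb Fa Fb k1 hk1le (by omega) (by omega)
              (by omega) (by omega)]
            set k2 := bGroupsB cs n '{' '}' Fb Fb k1 with hk2
            have hk2ge : k1 ≤ k2 := bGroupsB_ge cs n '{' '}' Fb Fb k1 hk1le (by omega)
            have hk2le : k2 ≤ n := bGroupsB_le cs n '{' '}' Fb Fb k1 hk1le (by omega)
            rw [if_neg (by omega : ¬ k2 = i)]
            exact ih g' k2 hk2le (by push_cast at hf ⊢; omega) (by push_cast at hg ⊢; omega)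
              (by omega) (by omega)
        · -- ordinary character: the run stops
          have hA : aAtom cs n Fa i = i := by
            simp only [hatom, if_neg (by omega : ¬ n ≤ i), if_neg h1]
            rw [if_pos (by simp [h3])]
          rw [hA, if_pos rfl, if_neg h1, if_neg (by push Not; exact fun hc => absurd hc h3)]
    · cases g <;> simp [aRun, bRunB, hi]

-- ===== VERDICT (by name: the statement is the Claim_ definition above) =====
theorem consume_latex_run_py_spec : Claim_equal_consume_latex_run_py := by
  intro s start _ hpre
  unfold Spec_consume_latex_run_py consume_latex_run_py consume_latex_run_py_alt
  simp only []
  unfold Pre_consume_latex_run_py at hpre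
  by_cases hle : start ≤ (s.toList.length : Int)
  · apply run_eq
    · exact hle
    all_goals omega
  · rw [aRun_stop _ _ _ _ _ (by omega), bRunB_stop _ _ _ _ _ (by omega)]
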